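-- pv_equiv track=rewrite | github.com/umeya/puzzle_alogorithm_python | ch01/number_puzzle_solver.py | four_digits_pattern
-- ===== SOURCE A (Python) =====
-- def four_digits_pattern(four_digits: str) -> tuple:
-- 	"""
-- 	:param four_digits: ４桁の数の文字列　この関数内部でソートされたリストにする
-- 						（例　"2113" は　['1','1','2','3'])
-- 	:return:tuple (n, e, ne)
-- 					n 数字の個数　（例　3）
-- 					e 各数字の個数　（例　[2,1,1])
-- 					ne 各数字　（例　['1', '2', '3']
-- 	"""
-- 	n, dd = 0, 0
-- 	e0, ne0 = ['dummy'], [0]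
-- 	for d in sorted(four_digits):
-- 		if d != ne0[n]:
-- 			n += 1
-- 			e0.append(1)
-- 			ne0.append(d)
-- 		else:
-- 			e0[n] = e0[n] + 1
-- 	return (n, e0[1:], ne0[1:])
-- ===== SOURCE B (Python) =====
-- def four_digits_pattern(four_digits: str) -> tuple:
-- 	counts = {}
-- 	for d in four_digits:
-- 		counts[d] = counts.get(d, 0) + 1
-- 	ne = sorted(counts)
-- 	return (len(ne), [counts[d] for d in ne], ne)
-- ===== Notes on version B (the rewrite author's own statement) =====
-- stated objective: idiomatic
-- what changed: Replaces A's single running-group pass over sorted(four_digits) with a sentinel-initialized heterogeneous state by a frequency dict built in one loop, then emitting sorted distinct keys and their counts.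
import Mathlib
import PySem

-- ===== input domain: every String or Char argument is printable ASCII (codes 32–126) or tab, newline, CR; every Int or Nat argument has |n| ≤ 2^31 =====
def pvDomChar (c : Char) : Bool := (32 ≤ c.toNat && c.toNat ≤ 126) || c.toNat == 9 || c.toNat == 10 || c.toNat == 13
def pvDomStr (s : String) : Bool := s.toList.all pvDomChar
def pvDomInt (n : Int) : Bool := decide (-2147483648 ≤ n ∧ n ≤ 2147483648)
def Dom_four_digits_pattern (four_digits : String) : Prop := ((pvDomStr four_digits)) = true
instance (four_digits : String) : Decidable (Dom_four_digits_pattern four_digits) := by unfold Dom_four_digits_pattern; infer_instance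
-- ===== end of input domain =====

-- B replaces A's running-group pass over the sorted characters by a count-then-emit-over-sorted-keys
-- structure (idiomatic; same asymptotic cost).

-- ===== PORT A =====
-- A's loop. Python's ne0 starts as the heterogeneous [0] (an int among 1-char strings): the int
-- sentinel can never equal a character, so it is modeled exactly by `none` in List (Option Char);
-- likewise e0 starts as ['dummy'], and that slot is provably never read (d == ne0[0] is impossible),
-- so it is modeled by the Int 0. ne0[n] / e0[n] are always in range (both lists have length n+1),
-- so List.getD / List.set are exact for Python's indexing and item assignment.
def fdaLoop : List Char → Nat → List Int → List (Option Char) → Nat × List Int × List (Option Char)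
  | [], n, e0, ne0 => (n, e0, ne0)
  | d :: rest, n, e0, ne0 =>
    if ne0.getD n none ≠ some d then
      fdaLoop rest (n + 1) (e0 ++ [1]) (ne0 ++ [some d])
    else
      fdaLoop rest n (e0.set n (e0.getD n 0 + 1)) ne0

def four_digits_pattern (four_digits : String) : Int × List Int × List String :=
  let r := fdaLoop (PySem.List.sorted four_digits.toList (fun x => x) false) 0 [0] [none]
  ((r.1 : Int), r.2.1.drop 1,
    (r.2.2.drop 1).map (fun oc => match oc with | some c => String.ofList [c] | none => ""))
    -- every element of ne0[1:] is an appended character (some c); the "" branch is unreachable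

-- ===== PORT B =====
-- Source B: counts = {}; for d in s: counts[d] = counts.get(d, 0) + 1; ne = sorted(counts);
-- return (len(ne), [counts[d] for d in ne], ne) — dict keys are 1-char strings, modeled as Char
-- (sorting 1-char ASCII strings coincides with sorting the characters).
def four_digits_pattern_alt (four_digits : String) : Int × List Int × List String :=
  let counts : PySem.Dict Char Int :=
    four_digits.toList.foldl (fun d c => d.insert c (d.getD c 0 + 1)) PySem.Dict.empty
  let ne := PySem.List.sorted counts.keys (fun x => x) false
  ((ne.length : Int), ne.map (fun c => counts.getD c 0), ne.map (fun c => String.ofList [c]))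

-- ===== PRECONDITION & SPEC =====
def Spec_four_digits_pattern (four_digits : String) (out : Int × List Int × List String) : Prop := out = four_digits_pattern_alt four_digits
instance (four_digits : String) (out : Int × List Int × List String) : Decidable (Spec_four_digits_pattern four_digits out) := by unfold Spec_four_digits_pattern; infer_instance

-- ===== CLAIM (what is proved, stated in full; the proofs are below) =====
def Claim_equal_four_digits_pattern : Prop := ∀ (four_digits : String), Dom_four_digits_pattern four_digits → Spec_four_digits_pattern four_digits (four_digits_pattern four_digits)

-- ===== LEMMAS AND PROOFS =====

-- Clean view of A's loop state: the accumulator is the list of groups built so far, in reverse,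
-- head = current (last) group.
def gLoop : List Char → List (Char × Int) → List (Char × Int)
  | [], acc => acc
  | d :: rest, acc =>
    match acc with
    | [] => gLoop rest [(d, 1)]
    | (c, k) :: t => if d = c then gLoop rest ((c, k + 1) :: t) else gLoop rest ((d, 1) :: (c, k) :: t)

-- Run-length encoding of a list (groups of adjacent equal characters, in order).
def runs : List Char → List (Char × Int)
  | [] => []
  | d :: rest =>
    match runs rest with
    | [] => [(d, 1)]
    | (c, k) :: r => if d = c then (d, k + 1) :: r else (d, 1) :: (c, k) :: r

-- fdaLoop simulates gLoop: the Python state (n, e0, ne0) is exactly the group list acc.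
theorem fdaLoop_eq_gLoop (l : List Char) : ∀ (acc : List (Char × Int)),
    fdaLoop l acc.length (0 :: acc.reverse.map Prod.snd) (none :: acc.reverse.map (fun p => some p.1))
      = ((gLoop l acc).length, 0 :: (gLoop l acc).reverse.map Prod.snd,
          none :: (gLoop l acc).reverse.map (fun p => some p.1)) := by
  induction l with
  | nil => intro acc; simp [fdaLoop, gLoop]
  | cons d rest ih =>
    intro acc
    match acc with
    | [] =>
      simp only [fdaLoop, gLoop, List.length_nil, List.reverse_nil, List.map_nil]
      rw [if_pos (by simp [List.getD])]
      simpa using ih [(d, 1)]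
    | (c, k) :: t =>
      have hget : ((none : Option Char) :: (((c, k) :: t).reverse.map (fun p : Char × Int => some p.1))).getD
          (((c, k) :: t).length) none = some c := by
        simp [List.getD_eq_getElem?_getD]
      simp only [fdaLoop, gLoop, hget]
      by_cases hdc : d = c
      · subst hdc
        rw [if_neg (by simp), if_pos rfl]
        have hset : ((0 : Int) :: (((d, k) :: t).reverse.map Prod.snd)).set (((d, k) :: t).length)
              (((0 : Int) :: (((d, k) :: t).reverse.map Prod.snd)).getD (((d, k) :: t).length) 0 + 1)
            = 0 :: (((d, k + 1) :: t).reverse.map Prod.snd) := by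
          simp [List.getD_eq_getElem?_getD]
        rw [hset]
        simpa using ih ((d, k + 1) :: t)
      · rw [if_pos (by simpa using fun h => hdc h.symm), if_neg hdc]
        simpa using ih ((d, 1) :: (c, k) :: t)

-- gLoop computes the run-length encoding of l, reversed onto the accumulator (the first run of l
-- is merged into the head group of acc when the characters match).
def mergeAcc (rl acc : List (Char × Int)) : List (Char × Int) :=
  match acc, rl with
  | (c, k) :: t, (c', k') :: r => if c' = c then ((c, k + k') :: r).reverse ++ t else rl.reverse ++ acc
  | _, _ => rl.reverse ++ acc

theorem gLoop_eq_mergeAcc (l : List Char) : ∀ acc, gLoop l acc = mergeAcc (runs l) acc := by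
  induction l with
  | nil =>
    intro acc
    match acc with
    | [] => simp [gLoop, runs, mergeAcc]
    | (c, k) :: t => simp [gLoop, runs, mergeAcc]
  | cons d rest ih =>
    intro acc
    match acc with
    | [] =>
      have h := ih [(d, 1)]
      simp only [gLoop, h]
      match hR : runs rest with
      | [] => simp [runs, hR, mergeAcc]
      | (c', k') :: r =>
        by_cases hc'd : c' = d
        · subst hc'd
          simp [runs, hR, mergeAcc, add_comm]
        · have hsym : ¬ d = c' := fun hh => hc'd hh.symm
          simp [runs, hR, mergeAcc, hc'd, hsym]
    | (c, k) :: t =>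
      simp only [gLoop]
      by_cases hdc : d = c
      · subst hdc
        have h := ih ((d, k + 1) :: t)
        rw [if_pos rfl, h]
        match hR : runs rest with
        | [] => simp [runs, hR, mergeAcc]
        | (c', k') :: r =>
          by_cases hc'd : c' = d
          · subst hc'd
            simp [runs, hR, mergeAcc]
            ring
          · have hsym : ¬ d = c' := fun hh => hc'd hh.symm
            simp [runs, hR, mergeAcc, hc'd, hsym]
      · have h := ih ((d, 1) :: (c, k) :: t)
        rw [if_neg hdc, h]
        match hR : runs rest with
        | [] => simp [runs, hR, mergeAcc, hdc]
        | (c', k') :: r =>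
          by_cases hc'd : c' = d
          · subst hc'd
            simp [runs, hR, mergeAcc, hdc, add_comm]
          · have hsym : ¬ d = c' := fun hh => hc'd hh.symm
            simp [runs, hR, mergeAcc, hdc, hc'd, hsym]

theorem gLoop_nil (l : List Char) : gLoop l [] = (runs l).reverse := by
  rw [gLoop_eq_mergeAcc]
  match hR : runs l with
  | [] => simp [mergeAcc]
  | (c', k') :: r => simp [mergeAcc]

-- On a ≤-sorted list, the run keys are strictly increasing, each run's length is the total count,
-- and the run keys are exactly the members of the list.
theorem runs_sorted_spec (l : List Char) (hs : l.Pairwise (· ≤ ·)) :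
    ((runs l).map Prod.fst).Pairwise (· < ·) ∧
    runs l = ((runs l).map Prod.fst).map (fun c => (c, (l.count c : Int))) ∧
    (∀ x, x ∈ (runs l).map Prod.fst ↔ x ∈ l) := by
  induction l with
  | nil => simp [runs]
  | cons d rest ih =>
    have hle : ∀ x ∈ rest, d ≤ x := fun x hx => (List.pairwise_cons.1 hs).1 x hx
    obtain ⟨ihp, ihe, ihm⟩ := ih (List.pairwise_cons.1 hs).2
    match hR : runs rest with
    | [] =>
      have hrest : rest = [] := by
        rw [List.eq_nil_iff_forall_not_mem]
        intro x hx
        have := (ihm x).2 hx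
        rw [hR] at this
        simp at this
      subst hrest
      simp [runs]
    | (c, k') :: r =>
      rw [hR] at ihp ihe ihm
      have hcmem : c ∈ rest := (ihm c).1 (by simp)
      have hk' : k' = (rest.count c : Int) := by
        have := congrArg (fun xs => xs.headD (c, 0)) ihe
        simpa using this
      by_cases hdceq : d = c
      · subst hdceq
        have hRl : runs (d :: rest) = (d, k' + 1) :: r := by simp [runs, hR]
        have hr : r = ((r.map Prod.fst).map (fun c => (c, (rest.count c : Int)))) := by
          have := congrArg List.tail ihe; simpa using this
        have hxd : ∀ x ∈ r.map Prod.fst, d < x := fun x hx =>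
          (List.pairwise_cons.1 ihp).1 x hx
        refine ⟨?_, ?_, ?_⟩
        · rw [hRl]
          simpa using ihp
        · rw [hRl, List.map_cons, List.map_cons]
          refine congrArg₂ _ ?_ ?_
          · simp [List.count_cons_self, hk']
          · conv_lhs => rw [hr]
            apply List.map_congr_left
            intro x hx
            have hxne : x ≠ d := ne_of_gt (hxd x hx)
            simp [List.count_cons_of_ne hxne.symm]
        · intro x
          rw [hRl]
          simp only [List.map_cons, List.mem_cons]
          constructor
          · rintro (h | h)
            · exact Or.inl h
            · exact Or.inr ((ihm x).1 (by simp [h]))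
          · rintro (h | h)
            · exact Or.inl h
            · have := (ihm x).2 h
              simpa using this
      · have hdlt : d < c := lt_of_le_of_ne (hle c hcmem) hdceq
        have hRl : runs (d :: rest) = (d, 1) :: (c, k') :: r := by simp [runs, hR, hdceq]
        have hkey : ∀ x ∈ ((c, k') :: r).map Prod.fst, d < x := by
          intro x hx
          rcases (by simpa using hx : x = c ∨ x ∈ r.map Prod.fst) with h | h
          · exact h ▸ hdlt
          · exact lt_trans hdlt ((List.pairwise_cons.1 ihp).1 x h)
        have hdnotin : d ∉ rest := by
          intro hd
          have := (ihm d).2 hd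
          exact absurd (hkey d this) (lt_irrefl d)
        refine ⟨?_, ?_, ?_⟩
        · rw [hRl, List.map_cons, List.pairwise_cons]
          exact ⟨hkey, ihp⟩
        · rw [hRl, List.map_cons, List.map_cons]
          refine congrArg₂ _ ?_ ?_
          · simp [List.count_cons_self, List.count_eq_zero.2 hdnotin]
          · conv_lhs => rw [ihe]
            apply List.map_congr_left
            intro x hx
            have hxne : x ≠ d := ne_of_gt (hkey x hx)
            simp [List.count_cons_of_ne hxne.symm]
        · intro x
          rw [hRl]
          simp only [List.map_cons, List.mem_cons]
          constructor
          · rintro (h | h)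
            · exact Or.inl h
            · have : x ∈ ((c, k') :: r).map Prod.fst := by simpa using h
              exact Or.inr ((ihm x).1 this)
          · rintro (h | h)
            · exact Or.inl h
            · have := (ihm x).2 h
              exact Or.inr (by simpa using this)

-- ===== VERDICT (by name: the statement is the Claim_ definition above) =====
theorem four_digits_pattern_spec : Claim_equal_four_digits_pattern := by
  intro s _
  unfold Spec_four_digits_pattern four_digits_pattern four_digits_pattern_alt
  set l0 := s.toList with hl0
  set l := PySem.List.sorted l0 (fun x => x) false with hl
  have hA : fdaLoop l 0 [0] [none] =
      ((gLoop l []).length, 0 :: (gLoop l []).reverse.map Prod.snd,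
        none :: (gLoop l []).reverse.map (fun p => some p.1)) := by
    simpa using fdaLoop_eq_gLoop l []
  have hg : gLoop l [] = (runs l).reverse := gLoop_nil l
  have hsorted : l.Pairwise (· ≤ ·) := by
    simpa using PySem.List.sorted_pairwise l0 (fun x => x)
  obtain ⟨hkeys_lt, hruns_eq, hmem⟩ := runs_sorted_spec l hsorted
  -- B's dict is Counter(l0); its keys are the distinct chars of l0 in first-occurrence order
  have hcounter := PySem.Dict.foldl_insert_getD_add_one_eq_counter (xs := l0)
  have hkeys : (PySem.Dict.counter l0).keys = PySem.Set.ofList l0 := PySem.Dict.keys_counter l0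
  -- sorted(set(l0)) equals the run keys of sorted(l0)
  have hperm : ((runs l).map Prod.fst).Perm (PySem.Set.ofList l0) := by
    rw [List.perm_ext_iff_of_nodup (hkeys_lt.imp ne_of_lt) (PySem.Set.nodup_ofList l0)]
    intro a
    rw [hmem a, PySem.Set.mem_ofList, hl]
    exact PySem.List.mem_sorted l0 (fun x => x) false a
  have hne_eq : PySem.List.sorted (PySem.Set.ofList l0) (fun x => x) false = (runs l).map Prod.fst :=
    PySem.List.sorted_eq_of_perm_of_pairwise_lt _ _ (fun x => x) hperm hkeys_lt
  have hcountl : ∀ c, l.count c = l0.count c := fun c =>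
    (PySem.List.sorted_perm (xs := l0) (key := fun x => x) (rev := false)).count_eq c
  have hgetD : ∀ c, (PySem.Dict.counter l0).getD c 0 = (l0.count c : Int) := fun c =>
    PySem.Dict.getD_counter l0 c
  simp only [hcounter, hkeys, hne_eq, hA, hg]
  refine Prod.ext ?_ (Prod.ext ?_ ?_)
  · simp
  · -- counts: A's run lengths = B's dict lookups over the keys
    simp only [List.drop_one, List.tail_cons, List.reverse_reverse]
    conv_lhs => rw [hruns_eq]
    simp only [List.map_map]
    apply List.map_congr_left
    intro p _
    simp [Function.comp, hgetD, hcountl]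
  · -- keys: A's appended characters = B's sorted keys, as 1-char strings
    simp only [List.drop_one, List.tail_cons, List.reverse_reverse]
    conv_lhs => rw [hruns_eq]
    simp only [List.map_map]
    apply List.map_congr_left
    intro p _
    rfl
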